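-- pv_equiv track=rewrite | github.com/xg6144/PSAN-Parametric-Spectral-Atom-Network-with-Frequency-Attribution | remove_duplicates.py | segment_ranges
-- ===== SOURCE A (Python) =====
-- def segment_ranges(total_bits: int, n_segs: int) -> list[tuple[int, int]]:
--     """total_bits를 n_segs로 거의 균등 분할. 반환: [(offset, size), ...]."""
--     base = total_bits // n_segs
--     extra = total_bits - base * n_segs
--     ranges = []
--     off = 0
--     for i in range(n_segs):
--         size = base + (1 if i < extra else 0)
--         ranges.append((off, size))
--         off += size
--     return ranges
-- ===== SOURCE B (Python) =====
-- def segment_ranges(total_bits: int, n_segs: int) -> list[tuple[int, int]]: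
--     base = total_bits // n_segs
--     extra = total_bits % n_segs
--     # first `extra` segments have size base+1 at offsets i*(base+1);
--     # the remaining ones have size base at offsets j*base + extra.
--     big = [(i * (base + 1), base + 1) for i in range(extra)]
--     small = [(j * base + extra, base) for j in range(extra, n_segs)]
--     return big + small
-- ===== Notes on version B (the rewrite author's own statement) =====
-- stated objective: alternative
-- what changed: Instead of one loop threading a running offset accumulator, B builds the answer in two staged comprehensions -- the extra size-(base+1) segments at offsets i*(base+1), then the size-base segments at offsets j*base+extra -- and concatenates them.
import Mathlib
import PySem

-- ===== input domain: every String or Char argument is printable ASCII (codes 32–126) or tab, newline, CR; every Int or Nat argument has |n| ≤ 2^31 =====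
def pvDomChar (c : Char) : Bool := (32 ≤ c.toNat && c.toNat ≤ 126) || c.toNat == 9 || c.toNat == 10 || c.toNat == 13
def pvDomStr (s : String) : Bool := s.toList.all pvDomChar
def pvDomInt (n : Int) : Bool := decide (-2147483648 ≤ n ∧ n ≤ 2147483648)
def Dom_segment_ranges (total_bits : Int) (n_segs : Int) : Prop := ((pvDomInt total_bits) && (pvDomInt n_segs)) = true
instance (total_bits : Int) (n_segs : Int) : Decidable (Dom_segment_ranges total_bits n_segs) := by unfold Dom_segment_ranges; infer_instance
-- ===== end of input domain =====

-- B builds the result in two staged comprehensions (the base+1 segments, then the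
-- base segments), each with a closed-form offset, instead of threading a running
-- offset accumulator through one loop; same cost, different decomposition.


-- ===== PORT A =====
def segment_ranges (total_bits : Int) (n_segs : Int) : List (Int × Int) :=
  let base := PySem.Int.floordiv total_bits n_segs
  let extra := total_bits - base * n_segs
  let st := (PySem.List.pyRange 0 n_segs 1).foldl
    (fun (st : List (Int × Int) × Int) i =>
      let size := base + (if i < extra then 1 else 0)
      (st.1 ++ [(st.2, size)], st.2 + size))
    ([], 0)
  st.1

-- ===== PORT B =====
def segment_ranges_alt (total_bits : Int) (n_segs : Int) : List (Int × Int) :=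
  let base := PySem.Int.floordiv total_bits n_segs
  let extra := PySem.Int.mod total_bits n_segs
  let big := (PySem.List.pyRange 0 extra 1).map (fun i => (i * (base + 1), base + 1))
  let small := (PySem.List.pyRange extra n_segs 1).map (fun j => (j * base + extra, base))
  big ++ small

-- ===== PRECONDITION & SPEC =====
-- Pre_ excludes only n_segs = 0, where Python's '//' (and '%') raises ZeroDivisionError in both A and B.
def Pre_segment_ranges (total_bits : Int) (n_segs : Int) : Prop := n_segs ≠ 0
instance (total_bits : Int) (n_segs : Int) : Decidable (Pre_segment_ranges total_bits n_segs) := by unfold Pre_segment_ranges; infer_instance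
def pvWitness_segment_ranges : Int × Int := (17, 5)

def Spec_segment_ranges (total_bits : Int) (n_segs : Int) (out : List (Int × Int)) : Prop := out = segment_ranges_alt total_bits n_segs
instance (total_bits : Int) (n_segs : Int) (out : List (Int × Int)) : Decidable (Spec_segment_ranges total_bits n_segs out) := by unfold Spec_segment_ranges; infer_instance

-- ===== CLAIM =====
def Claim_equal_segment_ranges : Prop := ∀ (total_bits : Int) (n_segs : Int), Dom_segment_ranges total_bits n_segs → Pre_segment_ranges total_bits n_segs → Spec_segment_ranges total_bits n_segs (segment_ranges total_bits n_segs)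

-- ===== LEMMAS AND PROOFS =====

-- Invariant for A's loop: after the prefix [0, a), the running offset is a*base + min a extra,
-- and the remaining fold appends one closed-form pair per index.
theorem seg_fold_inv (base extra : Int) :
    ∀ (b a : Int), 0 ≤ a →
    ∀ (acc : List (Int × Int)),
    ((PySem.List.pyRange a b 1).foldl
      (fun (st : List (Int × Int) × Int) i =>
        let size := base + (if i < extra then 1 else 0)
        (st.1 ++ [(st.2, size)], st.2 + size))
      (acc, a * base + min a extra)).1
    = acc ++ (PySem.List.pyRange a b 1).map
        (fun i => (i * base + min i extra, base + (if i < extra then 1 else 0))) := by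
  intro b
  have H : ∀ (k : Nat) (a : Int), 0 ≤ a → (b - a).toNat = k →
      ∀ (acc : List (Int × Int)),
      ((PySem.List.pyRange a b 1).foldl
        (fun (st : List (Int × Int) × Int) i =>
          let size := base + (if i < extra then 1 else 0)
          (st.1 ++ [(st.2, size)], st.2 + size))
        (acc, a * base + min a extra)).1
      = acc ++ (PySem.List.pyRange a b 1).map
          (fun i => (i * base + min i extra, base + (if i < extra then 1 else 0))) := by
    intro k
    induction k with
    | zero =>
      intro a ha hk acc
      rw [PySem.List.pyRange_one_eq_nil (by omega)]
      simp
    | succ k ih =>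
      intro a ha hk acc
      rw [PySem.List.pyRange_one_cons (by omega)]
      simp only [List.foldl_cons, List.map_cons]
      have hoff : a * base + min a extra + (base + (if a < extra then 1 else 0))
          = (a + 1) * base + min (a + 1) extra := by
        split_ifs with h <;> ring_nf <;> omega
      rw [hoff, ih (a + 1) (by omega) (by omega)]
      simp
  intro a ha acc
  exact H (b - a).toNat a ha rfl acc

-- ===== VERDICT =====
theorem segment_ranges_spec : Claim_equal_segment_ranges := by
  intro total_bits n_segs _ hpre
  unfold Spec_segment_ranges segment_ranges segment_ranges_alt
  simp only []
  have hmod : total_bits - PySem.Int.floordiv total_bits n_segs * n_segs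
      = PySem.Int.mod total_bits n_segs := by
    have h1 := PySem.Int.floordiv_mul_add_mod total_bits n_segs
    linarith
  rw [hmod]
  set base := PySem.Int.floordiv total_bits n_segs with hbase
  set extra := PySem.Int.mod total_bits n_segs with hextra
  by_cases hn : n_segs ≤ 0
  · have h1 : n_segs < 0 := lt_of_le_of_ne hn hpre
    have hb := PySem.Int.mod_neg_bounds (a := total_bits) h1
    rw [PySem.List.pyRange_one_eq_nil (le_of_lt h1),
        PySem.List.pyRange_one_eq_nil (by omega : (extra : Int) ≤ 0),
        PySem.List.pyRange_one_eq_nil (by omega : n_segs ≤ extra)]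
    simp
  · rw [not_le] at hn
    have h0 : (0:Int) ≤ extra := PySem.Int.mod_nonneg (a := total_bits) hn
    have h1 : extra < n_segs := PySem.Int.mod_lt (a := total_bits) hn
    have key := seg_fold_inv base extra n_segs 0 le_rfl []
    rw [show (0:Int) * base + min 0 extra = 0 by simp [min_eq_left h0]] at key
    rw [key]
    simp only [List.nil_append]
    rw [PySem.List.pyRange_one_append 0 extra n_segs h0 (le_of_lt h1), List.map_append]
    congr 1
    · apply List.map_congr_left
      intro i hi
      rw [PySem.List.mem_pyRange_one] at hi
      rw [min_eq_left (le_of_lt hi.2), if_pos hi.2]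
      exact Prod.ext (by ring) rfl
    · apply List.map_congr_left
      intro i hi
      rw [PySem.List.mem_pyRange_one] at hi
      rw [min_eq_right hi.1, if_neg (not_lt.mpr hi.1)]
      simp
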